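-- pv_equiv track=rewrite | github.com/CDBiddulph/scaffold-learning | scaffolds/human/crossword_early/scaffold.py | compute_numbering
-- ===== SOURCE A (Python) =====
-- def compute_numbering(grid):
--     """Computes the numbering for the crossword grid slots."""
--     if not grid or not grid[0]:
--         return [], [], []
--     rows, cols = len(grid), len(grid[0])
--     numbering_grid = [[None] * cols for _ in range(rows)]
--     next_number = 1
--     for r in range(rows):
--         for c in range(cols):
--             if grid[r][c] == ".":
--                 continue
--             is_across_start = (c == 0 or grid[r][c - 1] == ".") and (
--                 c < cols - 1 and grid[r][c + 1] != "."
--             )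
--             is_down_start = (r == 0 or grid[r - 1][c] == ".") and (
--                 r < rows - 1 and grid[r + 1][c] != "."
--             )
--             if is_across_start or is_down_start:
--                 numbering_grid[r][c] = next_number
--                 next_number += 1
--
--     across_slots, down_slots = [], []
--     for r in range(rows):
--         for c in range(cols):
--             num = numbering_grid[r][c]
--             if num is None:
--                 continue
--
--             # Check for across word start
--             if (c == 0 or grid[r][c - 1] == ".") and (
--                 c < cols - 1 and grid[r][c + 1] != "."
--             ):
--                 length = 0
--                 cc = c
--                 while cc < cols and grid[r][cc] != ".":
--                     length += 1
--                     cc += 1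
--                 across_slots.append((num, r, c, length))
--
--             # Check for down word start
--             if (r == 0 or grid[r - 1][c] == ".") and (
--                 r < rows - 1 and grid[r + 1][c] != "."
--             ):
--                 length = 0
--                 rr = r
--                 while rr < rows and grid[rr][c] != ".":
--                     length += 1
--                     rr += 1
--                 down_slots.append((num, r, c, length))
--
--     return numbering_grid, across_slots, down_slots
-- ===== SOURCE B (Python) =====
-- def _runs(cells):
--     """Maximal runs of consecutive non-'.' cells of length >= 2, as (start, length)."""
--     res = []
--     i, n = 0, len(cells)
--     while i < n:
--         if cells[i] == ".":
--             i += 1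
--             continue
--         j = i
--         while j < n and cells[j] != ".":
--             j += 1
--         if j - i >= 2:
--             res.append((i, j - i))
--         i = j
--     return res
--
--
-- def compute_numbering(grid):
--     """Computes the numbering for the crossword grid slots."""
--     if not grid or not grid[0]:
--         return [], [], []
--     rows, cols = len(grid), len(grid[0])
--     across = {}  # start cell -> across word length, discovered by scanning row runs
--     for r in range(rows):
--         for c, length in _runs([grid[r][c] for c in range(cols)]):
--             across[(r, c)] = length
--     down = {}  # start cell -> down word length, discovered by scanning column runs
--     for c in range(cols):
--         for r, length in _runs([grid[r][c] for r in range(rows)]):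
--             down[(r, c)] = length
--     number = {}  # start cell -> clue number, assigned in reading order
--     for r in range(rows):
--         for c in range(cols):
--             if (r, c) in across or (r, c) in down:
--                 number[(r, c)] = len(number) + 1
--     numbering_grid = [[number.get((r, c)) for c in range(cols)] for r in range(rows)]
--     across_slots = [(num, r, c, across[(r, c)])
--                     for (r, c), num in number.items() if (r, c) in across]
--     down_slots = [(num, r, c, down[(r, c)])
--                   for (r, c), num in number.items() if (r, c) in down]
--     return numbering_grid, across_slots, down_slots
-- ===== Notes on version B (the rewrite author's own statement) =====
-- stated objective: alternative
-- what changed: Replaces A's two per-cell passes with neighbour tests and while-loop re-scans by run-scanning: each row/column is scanned once for maximal non-'.' runs of length >= 2, which fill across/down start dicts; numbers are assigned by one membership pass in reading order and both slot lists are emitted from the number dict's insertion order, with no neighbour checks or re-scans.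
import Mathlib
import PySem

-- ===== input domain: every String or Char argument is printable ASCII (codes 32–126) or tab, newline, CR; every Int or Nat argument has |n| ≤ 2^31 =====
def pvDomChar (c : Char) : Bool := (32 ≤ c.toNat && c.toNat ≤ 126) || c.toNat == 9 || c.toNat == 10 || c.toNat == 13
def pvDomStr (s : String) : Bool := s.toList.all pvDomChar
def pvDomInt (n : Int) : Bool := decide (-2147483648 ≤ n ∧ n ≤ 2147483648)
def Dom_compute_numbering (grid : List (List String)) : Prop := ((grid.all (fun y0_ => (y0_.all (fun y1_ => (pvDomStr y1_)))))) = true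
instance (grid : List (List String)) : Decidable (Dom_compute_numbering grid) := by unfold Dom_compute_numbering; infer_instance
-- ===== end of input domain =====

-- B replaces A's per-cell neighbour checks plus while-loop re-scans by single run-scans of
-- each row/column into across/down start dicts, one membership pass assigning numbers in
-- reading order, and slot emission from the number dict (objective: alternative).


-- ===== PORT A =====
-- grid[r][c]; inside Pre_ every access the Python makes is in range, so the default is never read
def pvCell (g : List (List String)) (r c : Nat) : String := (g.getD r []).getD c ""

-- numbering_grid[r][c] = v
def pvSet2 (G : List (List (Option Int))) (r c : Nat) (v : Option Int) : List (List (Option Int)) :=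
  G.set r ((G.getD r []).set c v)

-- (c == 0 or grid[r][c-1] == ".") and (c < cols - 1 and grid[r][c+1] != ".")
def pvCondA (g : List (List String)) (cols r c : Nat) : Bool :=
  ((c == 0) || pvCell g r (c - 1) == ".") && (decide (c < cols - 1) && pvCell g r (c + 1) != ".")

-- (r == 0 or grid[r-1][c] == ".") and (r < rows - 1 and grid[r+1][c] != ".")
def pvCondD (g : List (List String)) (rows r c : Nat) : Bool :=
  ((r == 0) || pvCell g (r - 1) c == ".") && (decide (r < rows - 1) && pvCell g (r + 1) c != ".")

-- while cc < cols and grid[r][cc] != ".": length += 1; cc += 1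
def pvWhileA (g : List (List String)) (cols r cc : Nat) (len : Int) : Int :=
  if h : cc < cols ∧ pvCell g r cc ≠ "." then pvWhileA g cols r (cc + 1) (len + 1) else len
termination_by cols - cc
decreasing_by omega

-- while rr < rows and grid[rr][c] != ".": length += 1; rr += 1
def pvWhileD (g : List (List String)) (rows c rr : Nat) (len : Int) : Int :=
  if h : rr < rows ∧ pvCell g rr c ≠ "." then pvWhileD g rows c (rr + 1) (len + 1) else len
termination_by rows - rr
decreasing_by omega

-- body of the first (numbering) double loop
def aStep1 (g : List (List String)) (rows cols : Nat) (st : List (List (Option Int)) × Int)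
    (r c : Nat) : List (List (Option Int)) × Int :=
  if pvCell g r c == "." then st
  else if pvCondA g cols r c || pvCondD g rows r c then (pvSet2 st.1 r c (some st.2), st.2 + 1)
  else st

-- body of the second (slot-collecting) double loop
def aStep2 (g : List (List String)) (rows cols : Nat) (ng : List (List (Option Int)))
    (st : List (Int × Int × Int × Int) × List (Int × Int × Int × Int)) (r c : Nat) :
    List (Int × Int × Int × Int) × List (Int × Int × Int × Int) :=
  match (ng.getD r []).getD c none with
  | none => st
  | some num =>
    let st1 := if pvCondA g cols r c
      then (st.1 ++ [(num, (r : Int), (c : Int), pvWhileA g cols r c 0)], st.2) else st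
    if pvCondD g rows r c
      then (st1.1, st1.2 ++ [(num, (r : Int), (c : Int), pvWhileD g rows c r 0)]) else st1

def compute_numbering (grid : List (List String)) :
    List (List (Option Int)) × (List (Int × Int × Int × Int)) × (List (Int × Int × Int × Int)) :=
  if grid = [] ∨ grid.headD [] = [] then ([], [], []) else
  let rows := grid.length
  let cols := (grid.headD []).length
  let p1 := (List.range rows).foldl
      (fun st r => (List.range cols).foldl (fun st c => aStep1 grid rows cols st r c) st)
      (List.replicate rows (List.replicate cols (none : Option Int)), 1)
  let ng := p1.1
  let p2 := (List.range rows).foldl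
      (fun st r => (List.range cols).foldl (fun st c => aStep2 grid rows cols ng st r c) st)
      ([], [])
  (ng, p2.1, p2.2)

-- ===== PORT B =====
-- inner while of _runs: j = scanEnd; while j < n and cells[j] != ".": j += 1
def bScanEnd (cells : List String) (n j : Nat) : Nat :=
  if h : j < n ∧ cells.getD j "" ≠ "." then bScanEnd cells n (j + 1) else j
termination_by n - j
decreasing_by omega

theorem lt_bScanEnd (cells : List String) (n j : Nat) (h : j < n ∧ cells.getD j "" ≠ ".") :
    j < bScanEnd cells n j := by
  rw [bScanEnd, dif_pos h]
  have : ∀ k, j + 1 ≤ k → j + 1 ≤ bScanEnd cells n k := by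
    intro k hk
    fun_induction bScanEnd cells n k with
    | case1 k h' ih => exact ih (by omega)
    | case2 k h' => exact hk
  exact this (j + 1) (Nat.le_refl _)

-- outer while of _runs, with the result list as accumulator
def bRunsAux (cells : List String) (n i : Nat) (acc : List (Nat × Nat)) : List (Nat × Nat) :=
  if h : i < n then
    if hdot : cells.getD i "" = "." then bRunsAux cells n (i + 1) acc
    else bRunsAux cells n (bScanEnd cells n i)
      (acc ++ if 2 ≤ bScanEnd cells n i - i then [(i, bScanEnd cells n i - i)] else [])
  else acc
termination_by n - i
decreasing_by
  · omega
  · have := lt_bScanEnd cells n i ⟨h, hdot⟩; omega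

-- _runs(cells): maximal non-'.' runs of length >= 2 as (start, length)
def bRuns (cells : List String) : List (Nat × Nat) := bRunsAux cells cells.length 0 []

-- [grid[r][c] for c in range(cols)]
def bRow (g : List (List String)) (cols r : Nat) : List String :=
  (List.range cols).map (fun c => pvCell g r c)

-- [grid[r][c] for r in range(rows)]
def bCol (g : List (List String)) (rows c : Nat) : List String :=
  (List.range rows).map (fun r => pvCell g r c)

-- across = {}; for r: for (c, length) in _runs(row r): across[(r, c)] = length
def bAcross (g : List (List String)) (rows cols : Nat) : PySem.Dict (Nat × Nat) Int :=
  (List.range rows).foldl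
    (fun d r => (bRuns (bRow g cols r)).foldl (fun d p => d.insert (r, p.1) ((p.2 : Int))) d)
    PySem.Dict.empty

-- down = {}; for c: for (r, length) in _runs(col c): down[(r, c)] = length
def bDown (g : List (List String)) (rows cols : Nat) : PySem.Dict (Nat × Nat) Int :=
  (List.range cols).foldl
    (fun d c => (bRuns (bCol g rows c)).foldl (fun d p => d.insert (p.1, c) ((p.2 : Int))) d)
    PySem.Dict.empty

-- number = {}; for r: for c: if (r,c) in across or (r,c) in down: number[(r,c)] = len(number)+1
def bNumber (A D : PySem.Dict (Nat × Nat) Int) (rows cols : Nat) : PySem.Dict (Nat × Nat) Int :=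
  (List.range rows).foldl
    (fun d r => (List.range cols).foldl
      (fun d c => if A.contains (r, c) || D.contains (r, c)
        then d.insert (r, c) ((d.size : Int) + 1) else d) d)
    PySem.Dict.empty

def compute_numbering_alt (grid : List (List String)) :
    List (List (Option Int)) × (List (Int × Int × Int × Int)) × (List (Int × Int × Int × Int)) :=
  if grid = [] ∨ grid.headD [] = [] then ([], [], []) else
  let rows := grid.length
  let cols := (grid.headD []).length
  let A := bAcross grid rows cols
  let D := bDown grid rows cols
  let N := bNumber A D rows cols
  ((List.range rows).map (fun r => (List.range cols).map (fun c => N.get? (r, c))),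
   N.items.filterMap (fun p => match A.get? p.1 with
     | some L => some (p.2, (p.1.1 : Int), (p.1.2 : Int), L)
     | none => none),
   N.items.filterMap (fun p => match D.get? p.1 with
     | some L => some (p.2, (p.1.1 : Int), (p.1.2 : Int), L)
     | none => none))

-- ===== PRECONDITION & SPEC =====
-- Pre_ excludes exactly the ragged grids having some row shorter than the first row,
-- on which the Python A raises IndexError (it indexes grid[r][c] for every c < len(grid[0])).
def Pre_compute_numbering (grid : List (List String)) : Prop :=
  ∀ row ∈ grid, (grid.headD []).length ≤ row.length

instance (grid : List (List String)) : Decidable (Pre_compute_numbering grid) := by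
  unfold Pre_compute_numbering; infer_instance

def pvWitness_compute_numbering : List (List String) := [["A", "B"], [".", "B"]]

def Spec_compute_numbering (grid : List (List String)) (out : List (List (Option Int)) × (List (Int × Int × Int × Int)) × (List (Int × Int × Int × Int))) : Prop := out = compute_numbering_alt grid
instance (grid : List (List String)) (out : List (List (Option Int)) × (List (Int × Int × Int × Int)) × (List (Int × Int × Int × Int))) : Decidable (Spec_compute_numbering grid out) := by unfold Spec_compute_numbering; infer_instance

-- ===== CLAIM (what is proved, stated in full; the proofs are below) =====
def Claim_equal_compute_numbering : Prop := ∀ (grid : List (List String)), Dom_compute_numbering grid → Pre_compute_numbering grid → Spec_compute_numbering grid (compute_numbering grid)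

-- ===== LEMMAS AND PROOFS =====

-- length of the run of cells satisfying p starting at c, bounded by n
def natRun (p : Nat → Bool) (n c : Nat) : Nat :=
  if h : c < n ∧ p c then natRun p n (c + 1) + 1 else 0
termination_by n - c
decreasing_by omega

def runR (g : List (List String)) (cols r c : Nat) : Int :=
  (natRun (fun j => pvCell g r j != ".") cols c : Int)

def runD (g : List (List String)) (rows c r : Nat) : Int :=
  (natRun (fun i => pvCell g i c != ".") rows r : Int)

-- start markers (A only evaluates its conditions on non-'.' cells)
def startA (g : List (List String)) (cols r c : Nat) : Bool :=
  (pvCell g r c != ".") && pvCondA g cols r c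
def startD (g : List (List String)) (rows r c : Nat) : Bool :=
  (pvCell g r c != ".") && pvCondD g rows r c
def stB (g : List (List String)) (rows cols r c : Nat) : Bool :=
  startA g cols r c || startD g rows r c

-- number bookkeeping
def cntRow (g : List (List String)) (rows cols r k : Nat) : Nat :=
  ((List.range k).filter (stB g rows cols r)).length
def cntUpTo (g : List (List String)) (rows cols m : Nat) : Nat :=
  ((List.range m).map (fun r => cntRow g rows cols r cols)).sum
def numAt (g : List (List String)) (rows cols r c : Nat) : Int :=
  ((1 + cntUpTo g rows cols r + cntRow g rows cols r c : Nat) : Int)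

-- shared closed forms
def cfRow (g : List (List String)) (rows cols r : Nat) : List (Option Int) :=
  (List.range cols).map (fun c => if stB g rows cols r c then some (numAt g rows cols r c) else none)
def cfARowP (g : List (List String)) (rows cols r k : Nat) : List (Int × Int × Int × Int) :=
  (List.range k).filterMap (fun c => if startA g cols r c
    then some (numAt g rows cols r c, (r : Int), (c : Int), runR g cols r c) else none)
def cfDRowP (g : List (List String)) (rows cols r k : Nat) : List (Int × Int × Int × Int) :=
  (List.range k).filterMap (fun c => if startD g rows r c
    then some (numAt g rows cols r c, (r : Int), (c : Int), runD g rows c r) else none)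
def cfAP (g : List (List String)) (rows cols m : Nat) : List (Int × Int × Int × Int) :=
  (List.range m).flatMap (fun r => cfARowP g rows cols r cols)
def cfDP (g : List (List String)) (rows cols m : Nat) : List (Int × Int × Int × Int) :=
  (List.range m).flatMap (fun r => cfDRowP g rows cols r cols)
def gPart (g : List (List String)) (rows cols m : Nat) : List (List (Option Int)) :=
  (List.range rows).map (fun r => if r < m then cfRow g rows cols r else List.replicate cols none)

theorem pvWhileA_eq (g : List (List String)) (cols r cc : Nat) (len : Int) :
    pvWhileA g cols r cc len = len + runR g cols r cc := by
  unfold runR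
  fun_induction pvWhileA g cols r cc len with
  | case1 cc len h ih =>
      have h' : cc < cols ∧ ((fun j => pvCell g r j != ".") cc) = true := by
        simpa [bne_iff_ne] using h
      rw [ih]; conv_rhs => rw [natRun]
      rw [dif_pos h']; push_cast; ring
  | case2 cc len h =>
      rw [natRun, dif_neg (by simpa [bne_iff_ne] using h)]; ring

theorem pvWhileD_eq (g : List (List String)) (rows c rr : Nat) (len : Int) :
    pvWhileD g rows c rr len = len + runD g rows c rr := by
  unfold runD
  fun_induction pvWhileD g rows c rr len with
  | case1 rr len h ih =>
      have h' : rr < rows ∧ ((fun i => pvCell g i c != ".") rr) = true := by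
        simpa [bne_iff_ne] using h
      rw [ih]; conv_rhs => rw [natRun]
      rw [dif_pos h']; push_cast; ring
  | case2 rr len h =>
      rw [natRun, dif_neg (by simpa [bne_iff_ne] using h)]; ring

theorem stB_cell (g : List (List String)) (rows cols r c : Nat) (h : stB g rows cols r c = true) :
    pvCell g r c ≠ "." := by
  intro hcell
  simp only [stB, startA, startD, Bool.or_eq_true, Bool.and_eq_true, bne_iff_ne, ne_eq] at h
  rcases h with ⟨h1, _⟩ | ⟨h1, _⟩ <;> exact h1 hcell

theorem cntRow_succ (g : List (List String)) (rows cols r k : Nat) :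
    cntRow g rows cols r (k + 1) = cntRow g rows cols r k + (if stB g rows cols r k then 1 else 0) := by
  unfold cntRow
  rw [List.range_succ, List.filter_append]
  by_cases h : stB g rows cols r k = true <;> simp [h]

theorem cntUpTo_succ (g : List (List String)) (rows cols m : Nat) :
    cntUpTo g rows cols (m + 1) = cntUpTo g rows cols m + cntRow g rows cols m cols := by
  unfold cntUpTo
  rw [List.range_succ, List.map_append]; simp

-- list helpers
theorem set_map_range {α : Type} (f : Nat → α) (n k : Nat) (v : α) (hk : k < n) :
    ((List.range n).map f).set k v = (List.range n).map (fun c => if c = k then v else f c) := by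
  apply List.ext_getElem
  · simp
  · intro i h1 h2
    simp only [List.getElem_set, List.getElem_map, List.getElem_range]
    simp only [List.length_set, List.length_map, List.length_range] at h1
    split_ifs with e1 e2 e3 <;> first | rfl | omega

theorem map_range_congr {α : Type} (f h : Nat → α) (n : Nat) (he : ∀ c, c < n → f c = h c) :
    (List.range n).map f = (List.range n).map h := by
  apply List.map_congr_left
  intro c hc
  exact he c (List.mem_range.mp hc)

theorem getD_map_range {α : Type} (f : Nat → α) (n i : Nat) (d : α) (hi : i < n) :
    ((List.range n).map f).getD i d = f i := by
  rw [List.getD_eq_getElem?_getD, List.getElem?_map, List.getElem?_range hi]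
  rfl

-- ===== A-side reduction to the closed forms =====

-- pass 1, inner loop as an action on row r only
def rowStep1 (g : List (List String)) (rows cols r : Nat) (st : List (Option Int) × Int) (c : Nat) :
    List (Option Int) × Int :=
  if pvCell g r c == "." then st
  else if pvCondA g cols r c || pvCondD g rows r c then (st.1.set c (some st.2), st.2 + 1)
  else st

theorem inner_as_row (g : List (List String)) (rows cols : Nat) :
    ∀ (cs : List Nat) (G : List (List (Option Int))) (n : Int) (r : Nat), r < G.length →
    cs.foldl (fun st c => aStep1 g rows cols st r c) (G, n)
      = (G.set r (cs.foldl (rowStep1 g rows cols r) (G.getD r [], n)).1,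
         (cs.foldl (rowStep1 g rows cols r) (G.getD r [], n)).2) := by
  intro cs
  induction cs with
  | nil =>
    intro G n r hr
    simp only [List.foldl_nil]
    rw [List.getD_eq_getElem?_getD, List.getElem?_eq_getElem hr]
    simp [List.set_getElem_self hr]
  | cons c cs ih =>
    intro G n r hr
    simp only [List.foldl_cons]
    by_cases h1 : pvCell g r c = "."
    · have e1 : aStep1 g rows cols (G, n) r c = (G, n) := by simp [aStep1, h1]
      have e2 : rowStep1 g rows cols r (G.getD r [], n) c = (G.getD r [], n) := by
        simp [rowStep1, h1]
      rw [e1, e2]; exact ih G n r hr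
    · by_cases h2 : (pvCondA g cols r c || pvCondD g rows r c) = true
      · have e1 : aStep1 g rows cols (G, n) r c = (pvSet2 G r c (some n), n + 1) := by
          simp [aStep1, h1, h2]
        have e2 : rowStep1 g rows cols r (G.getD r [], n) c
            = ((G.getD r []).set c (some n), n + 1) := by
          simp [rowStep1, h1, h2]
        rw [e1, e2]
        have hr' : r < (pvSet2 G r c (some n)).length := by simpa [pvSet2] using hr
        rw [ih _ _ r hr']
        have hgd : (pvSet2 G r c (some n)).getD r [] = (G.getD r []).set c (some n) := by
          unfold pvSet2
          rw [List.getD_eq_getElem?_getD, List.getElem?_eq_getElem (by simpa using hr)]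
          simp [List.getElem_set_self (by simpa using hr)]
        rw [hgd]
        unfold pvSet2
        rw [List.set_set]
      · have e1 : aStep1 g rows cols (G, n) r c = (G, n) := by simp [aStep1, h1, h2]
        have e2 : rowStep1 g rows cols r (G.getD r [], n) c = (G.getD r [], n) := by
          simp [rowStep1, h1, h2]
        rw [e1, e2]; exact ih G n r hr

theorem rowfold1 (g : List (List String)) (rows cols r : Nat) (n0 : Nat) :
    ∀ (k : Nat), k ≤ cols →
    (List.range k).foldl (rowStep1 g rows cols r) (List.replicate cols (none : Option Int), ((n0 : Nat) : Int))
      = ((List.range cols).map (fun c => if c < k ∧ stB g rows cols r c = true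
            then some ((n0 + cntRow g rows cols r c : Nat) : Int) else none),
         ((n0 + cntRow g rows cols r k : Nat) : Int)) := by
  intro k
  induction k with
  | zero =>
    intro _
    simp only [List.range_zero, List.foldl_nil, cntRow, List.filter_nil, List.length_nil,
      Nat.add_zero]
    rw [Prod.mk.injEq]
    refine ⟨?_, rfl⟩
    apply List.ext_getElem
    · simp
    · intro i h1 h2; simp
  | succ k ih =>
    intro hk
    have hk' : k < cols := by omega
    rw [List.range_succ, List.foldl_append, ih (by omega)]
    simp only [List.foldl_cons, List.foldl_nil]
    by_cases h1 : pvCell g r k = "."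
    · have hsb : stB g rows cols r k = false := by
        simp [stB, startA, startD, h1]
      have e : rowStep1 g rows cols r
          ((List.range cols).map (fun c => if c < k ∧ stB g rows cols r c = true
             then some ((n0 + cntRow g rows cols r c : Nat) : Int) else none),
           ((n0 + cntRow g rows cols r k : Nat) : Int)) k
          = ((List.range cols).map (fun c => if c < k ∧ stB g rows cols r c = true
             then some ((n0 + cntRow g rows cols r c : Nat) : Int) else none),
           ((n0 + cntRow g rows cols r k : Nat) : Int)) := by
        simp [rowStep1, h1]
      rw [e, Prod.mk.injEq]
      constructor
      · apply map_range_congr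
        intro c hc
        by_cases hck : c = k
        · subst hck; simp [hsb]
        · have hiff : (c < k + 1) ↔ (c < k) := by omega
          simp [hiff]
      · rw [cntRow_succ, hsb]; norm_num
    · by_cases h2 : (pvCondA g cols r k || pvCondD g rows r k) = true
      · have hsb : stB g rows cols r k = true := by
          simp only [stB, startA, startD]
          cases ha : pvCondA g cols r k <;> cases hd : pvCondD g rows r k <;>
            simp_all [bne_iff_ne]
        have e : rowStep1 g rows cols r
            ((List.range cols).map (fun c => if c < k ∧ stB g rows cols r c = true
               then some ((n0 + cntRow g rows cols r c : Nat) : Int) else none),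
             ((n0 + cntRow g rows cols r k : Nat) : Int)) k
            = (((List.range cols).map (fun c => if c < k ∧ stB g rows cols r c = true
               then some ((n0 + cntRow g rows cols r c : Nat) : Int) else none)).set k
                 (some ((n0 + cntRow g rows cols r k : Nat) : Int)),
             ((n0 + cntRow g rows cols r k : Nat) : Int) + 1) := by
          simp [rowStep1, h1, h2]
        rw [e, Prod.mk.injEq]
        constructor
        · rw [set_map_range _ cols k _ hk']
          apply map_range_congr
          intro c hc
          by_cases hck : c = k
          · subst hck; simp [hsb]
          · have hiff : (c < k + 1) ↔ (c < k) := by omega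
            simp [hck, hiff]
        · simp [cntRow_succ, hsb]; push_cast; omega
      · have hsb : stB g rows cols r k = false := by
          have h2' := Bool.or_eq_false_iff.mp (Bool.eq_false_iff.mpr h2)
          simp [stB, startA, startD, h2'.1, h2'.2]
        have e : rowStep1 g rows cols r
            ((List.range cols).map (fun c => if c < k ∧ stB g rows cols r c = true
               then some ((n0 + cntRow g rows cols r c : Nat) : Int) else none),
             ((n0 + cntRow g rows cols r k : Nat) : Int)) k
            = ((List.range cols).map (fun c => if c < k ∧ stB g rows cols r c = true
               then some ((n0 + cntRow g rows cols r c : Nat) : Int) else none),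
             ((n0 + cntRow g rows cols r k : Nat) : Int)) := by
          simp [rowStep1, h1, h2]
        rw [e, Prod.mk.injEq]
        constructor
        · apply map_range_congr
          intro c hc
          by_cases hck : c = k
          · subst hck; simp [hsb]
          · have hiff : (c < k + 1) ↔ (c < k) := by omega
            simp [hiff]
        · rw [cntRow_succ, hsb]; norm_num

theorem pass1fold (g : List (List String)) (rows cols : Nat) :
    ∀ (m : Nat), m ≤ rows →
    (List.range m).foldl
      (fun st r => (List.range cols).foldl (fun st c => aStep1 g rows cols st r c) st)
      (List.replicate rows (List.replicate cols (none : Option Int)), 1)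
      = (gPart g rows cols m, ((1 + cntUpTo g rows cols m : Nat) : Int)) := by
  intro m
  induction m with
  | zero =>
    intro _
    simp only [List.range_zero, List.foldl_nil, cntUpTo, List.map_nil, List.sum_nil,
      Nat.add_zero]
    rw [Prod.mk.injEq]
    constructor
    · unfold gPart
      apply List.ext_getElem
      · simp
      · intro i h1 h2; simp
    · norm_num
  | succ m ih =>
    intro hm
    have hm' : m < rows := by omega
    rw [List.range_succ, List.foldl_append, ih (by omega)]
    simp only [List.foldl_cons, List.foldl_nil]
    have hlen : m < (gPart g rows cols m).length := by simp [gPart, hm']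
    rw [inner_as_row g rows cols (List.range cols) (gPart g rows cols m)
      (((1 + cntUpTo g rows cols m : Nat) : Int)) m hlen]
    have hgd : (gPart g rows cols m).getD m [] = List.replicate cols none := by
      unfold gPart
      rw [getD_map_range _ rows m _ hm']
      simp
    rw [hgd, rowfold1 g rows cols m (1 + cntUpTo g rows cols m) cols (Nat.le_refl _)]
    rw [Prod.mk.injEq]
    constructor
    · unfold gPart
      rw [set_map_range _ rows m _ hm']
      apply map_range_congr
      intro r' hr'
      by_cases hrm : r' = m
      · subst hrm
        have : r' < r' + 1 := by omega
        simp only [if_pos rfl, if_pos this]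
        unfold cfRow
        apply map_range_congr
        intro c hc
        by_cases hs : stB g rows cols r' c = true
        · simp only [hc, hs, and_true, if_pos, true_and, if_true]
          rfl
        · rw [if_neg (by tauto), if_neg hs]
      · have hiff : (r' < m + 1) ↔ (r' < m) := by omega
        simp [hrm, hiff]
    · rw [cntUpTo_succ]
      congr 1
      omega

theorem gPart_full (g : List (List String)) (rows cols : Nat) :
    gPart g rows cols rows = (List.range rows).map (cfRow g rows cols) := by
  unfold gPart
  apply map_range_congr
  intro r hr
  simp [hr]

theorem cfGrid_getD (g : List (List String)) (rows cols r c : Nat) (hr : r < rows) (hc : c < cols) :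
    (((List.range rows).map (cfRow g rows cols)).getD r []).getD c none
      = (if stB g rows cols r c then some (numAt g rows cols r c) else none) := by
  rw [getD_map_range _ rows r _ hr]
  unfold cfRow
  rw [getD_map_range _ cols c _ hc]

theorem inner2 (g : List (List String)) (rows cols r : Nat) (hr : r < rows) :
    ∀ (k : Nat), k ≤ cols → ∀ (xs ys : List (Int × Int × Int × Int)),
    (List.range k).foldl
        (fun st c => aStep2 g rows cols ((List.range rows).map (cfRow g rows cols)) st r c) (xs, ys)
      = (xs ++ cfARowP g rows cols r k, ys ++ cfDRowP g rows cols r k) := by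
  intro k
  induction k with
  | zero =>
    intro _ xs ys
    simp [cfARowP, cfDRowP]
  | succ k ih =>
    intro hk xs ys
    have hck : k < cols := by omega
    rw [List.range_succ, List.foldl_append, ih (by omega)]
    simp only [List.foldl_cons, List.foldl_nil]
    have hng := cfGrid_getD g rows cols r k hr hck
    have hA1 : cfARowP g rows cols r (k + 1) = cfARowP g rows cols r k
        ++ (if startA g cols r k = true
            then [(numAt g rows cols r k, (r : Int), (k : Int), runR g cols r k)] else []) := by
      unfold cfARowP
      rw [List.range_succ, List.filterMap_append]
      congr 1
      by_cases h : startA g cols r k = true <;> simp [h]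
    have hD1 : cfDRowP g rows cols r (k + 1) = cfDRowP g rows cols r k
        ++ (if startD g rows r k = true
            then [(numAt g rows cols r k, (r : Int), (k : Int), runD g rows k r)] else []) := by
      unfold cfDRowP
      rw [List.range_succ, List.filterMap_append]
      congr 1
      by_cases h : startD g rows r k = true <;> simp [h]
    by_cases hsb : stB g rows cols r k = true
    · rw [if_pos hsb] at hng
      have hcell := stB_cell g rows cols r k hsb
      have hAc : pvCondA g cols r k = startA g cols r k := by
        simp [startA, bne_iff_ne, hcell]
      have hDc : pvCondD g rows r k = startD g rows r k := by
        simp [startD, bne_iff_ne, hcell]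
      rw [hA1, hD1]
      simp only [aStep2, hng]
      by_cases ha : startA g cols r k = true <;> by_cases hd : startD g rows r k = true
      · simp [ha, hd, hAc, hDc, pvWhileA_eq, pvWhileD_eq, List.append_assoc]
      · simp [ha, hd, hAc, hDc, pvWhileA_eq, pvWhileD_eq, List.append_assoc]
      · simp [ha, hd, hAc, hDc, pvWhileA_eq, pvWhileD_eq, List.append_assoc]
      · exfalso
        simp [stB, ha, hd] at hsb
    · rw [if_neg hsb] at hng
      have ha : startA g cols r k = false := by
        cases h : startA g cols r k
        · rfl
        · exact absurd (by simp [stB, h]) hsb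
      have hd : startD g rows r k = false := by
        cases h : startD g rows r k
        · rfl
        · exact absurd (by simp [stB, h]) hsb
      rw [hA1, hD1]
      simp only [aStep2, hng, ha, hd]
      simp

theorem pass2fold (g : List (List String)) (rows cols : Nat) :
    ∀ (m : Nat), m ≤ rows →
    (List.range m).foldl
      (fun st r => (List.range cols).foldl
        (fun st c => aStep2 g rows cols ((List.range rows).map (cfRow g rows cols)) st r c) st)
      ([], [])
      = (cfAP g rows cols m, cfDP g rows cols m) := by
  intro m
  induction m with
  | zero =>
    intro _
    simp [cfAP, cfDP]
  | succ m ih =>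
    intro hm
    have hm' : m < rows := by omega
    rw [List.range_succ, List.foldl_append, ih (by omega)]
    simp only [List.foldl_cons, List.foldl_nil]
    rw [inner2 g rows cols m hm' cols (Nat.le_refl _)]
    unfold cfAP cfDP
    rw [List.range_succ, List.flatMap_append]
    simp

-- ===== B-side reduction to the same closed forms =====

def cellsP (cells : List String) (k : Nat) : Bool := cells.getD k "" != "."

-- the condition under which _runs records a run starting at c (length read off natRun)
def startAt (cells : List String) (n c : Nat) : Bool :=
  ((c == 0) || cells.getD (c - 1) "" == ".") && (cells.getD c "" != ".") &&
    decide (2 ≤ natRun (cellsP cells) n c)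

def runsSpec (cells : List String) (n i : Nat) : List (Nat × Nat) :=
  (List.range' i (n - i)).filterMap (fun c => if startAt cells n c
    then some (c, natRun (cellsP cells) n c) else none)

theorem natRun_congr (p q : Nat → Bool) (n : Nat) (hpq : ∀ k, k < n → p k = q k) :
    ∀ c, natRun p n c = natRun q n c := by
  intro c
  fun_induction natRun p n c with
  | case1 c h ih =>
      rw [ih]
      conv_rhs => rw [natRun]
      rw [dif_pos ⟨h.1, (hpq c h.1) ▸ h.2⟩]
  | case2 c h =>
      conv_rhs => rw [natRun]
      rw [dif_neg]
      intro hq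
      exact h ⟨hq.1, (hpq c hq.1) ▸ hq.2⟩

theorem bScanEnd_eq (cells : List String) (n j : Nat) :
    bScanEnd cells n j = j + natRun (cellsP cells) n j := by
  fun_induction bScanEnd cells n j with
  | case1 j h ih =>
      rw [ih]
      conv_rhs => rw [natRun]
      rw [dif_pos ⟨h.1, by simpa [cellsP, bne_iff_ne] using h.2⟩]
      omega
  | case2 j h =>
      conv_rhs => rw [natRun]
      rw [dif_neg]
      · omega
      · intro hq
        exact h ⟨hq.1, by simpa [cellsP, bne_iff_ne] using hq.2⟩

theorem bScanEnd_le (cells : List String) (n j : Nat) (hj : j ≤ n) :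
    bScanEnd cells n j ≤ n := by
  fun_induction bScanEnd cells n j with
  | case1 j h ih => exact ih (by omega)
  | case2 j h => exact hj

theorem bScanEnd_run (cells : List String) (n j : Nat) :
    ∀ k, j ≤ k → k < bScanEnd cells n j → cells.getD k "" ≠ "." := by
  fun_induction bScanEnd cells n j with
  | case1 j h ih =>
      intro k hk hlt
      by_cases hkj : k = j
      · subst hkj; exact h.2
      · exact ih k (by omega) hlt
  | case2 j h =>
      intro k hk hlt
      omega

theorem bScanEnd_stop (cells : List String) (n j : Nat) :
    ¬ (bScanEnd cells n j < n ∧ cells.getD (bScanEnd cells n j) "" ≠ ".") := by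
  fun_induction bScanEnd cells n j with
  | case1 j h ih => exact ih
  | case2 j h => exact h

theorem bRunsAux_eq (cells : List String) (n : Nat) :
    ∀ (fuel i : Nat) (acc : List (Nat × Nat)), n - i ≤ fuel →
    (i = 0 ∨ n ≤ i ∨ cells.getD i "" = "." ∨ cells.getD (i - 1) "" = ".") →
    bRunsAux cells n i acc = acc ++ runsSpec cells n i := by
  intro fuel
  induction fuel with
  | zero =>
    intro i acc hf _
    have hni : ¬ i < n := by omega
    rw [bRunsAux, dif_neg hni]
    unfold runsSpec
    have h0 : n - i = 0 := by omega
    simp [h0]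
  | succ fuel ih =>
    intro i acc hf hinv
    by_cases hi : i < n
    · by_cases hdot : cells.getD i "" = "."
      · rw [bRunsAux, dif_pos hi, dif_pos hdot,
          ih (i + 1) acc (by omega) (Or.inr (Or.inr (Or.inr (by simpa using hdot))))]
        congr 1
        unfold runsSpec
        have hn : n - i = (n - (i + 1)) + 1 := by omega
        rw [hn, List.range'_succ]
        have hcf : (cells.getD i "" != ".") = false := by rw [hdot]; rfl
        have hfi : startAt cells n i = false := by
          simp only [startAt, hcf, Bool.false_and, Bool.and_false]
        simp [hfi]
      · rw [bRunsAux, dif_pos hi, dif_neg hdot]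
        have hij : i < bScanEnd cells n i := lt_bScanEnd cells n i ⟨hi, hdot⟩
        have hjn : bScanEnd cells n i ≤ n := bScanEnd_le cells n i (by omega)
        have hrun := bScanEnd_run cells n i
        have hstop := bScanEnd_stop cells n i
        have hnr : natRun (cellsP cells) n i = bScanEnd cells n i - i := by
          have := bScanEnd_eq cells n i; omega
        set j := bScanEnd cells n i with hj
        have hinv' : j = 0 ∨ n ≤ j ∨ cells.getD j "" = "." ∨ cells.getD (j - 1) "" = "." := by
          by_cases hjlt : j < n
          · right; right; left
            by_contra hne
            exact hstop ⟨hjlt, hne⟩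
          · right; left; omega
        rw [ih j _ (by omega) hinv', List.append_assoc]
        congr 1
        -- (ite run) ++ runsSpec j = runsSpec i
        unfold runsSpec
        have hsplit : n - i = (j - i) + (n - j) := by omega
        rw [hsplit, ← List.range'_append_1]
        have hji : i + (j - i) = j := by omega
        rw [hji, List.filterMap_append]
        congr 1
        have hrange : j - i = (j - i - 1) + 1 := by omega
        have hcons : List.range' i (j - i) = i :: List.range' (i + 1) (j - i - 1) := by
          conv_lhs => rw [hrange]
          rw [List.range'_succ]
        rw [hcons, List.filterMap_cons]
        have hmid : (List.range' (i + 1) (j - i - 1)).filterMap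
            (fun c => if startAt cells n c then some (c, natRun (cellsP cells) n c) else none)
            = [] := by
          apply List.filterMap_eq_nil_iff.mpr
          intro c hc
          have hcb := List.mem_range'_1.mp hc
          have hleft : cells.getD (c - 1) "" ≠ "." := hrun (c - 1) (by omega) (by omega)
          have hc0 : (c == 0) = false := by simp; omega
          have hlb : (cells.getD (c - 1) "" == ".") = false := beq_eq_false_iff_ne.mpr hleft
          have hstart : startAt cells n c = false := by
            simp only [startAt, hc0, hlb, Bool.false_or, Bool.false_and]
          simp [hstart]
        have hbnd : ((i == 0) || cells.getD (i - 1) "" == ".") = true := by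
          rcases hinv with h | h | h | h
          · simp [h]
          · omega
          · exact absurd h hdot
          · have hb : (cells.getD (i - 1) "" == ".") = true := beq_iff_eq.mpr h
            rw [hb, Bool.or_true]
        have hcb : (cells.getD i "" != ".") = true := bne_iff_ne.mpr hdot
        have hstartAt : startAt cells n i = decide (2 ≤ j - i) := by
          simp only [startAt, hbnd, hcb, Bool.true_and, hnr]
        rw [hstartAt, hmid, hnr]
        by_cases h2 : 2 ≤ j - i
        · have hd2 : decide (2 ≤ j - i) = true := by simpa using h2
          rw [hd2, if_pos h2]
          simp
        · have hd2 : decide (2 ≤ j - i) = false := by simpa using h2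
          rw [hd2, if_neg h2]
          simp
    · rw [bRunsAux, dif_neg hi]
      unfold runsSpec
      have h0 : n - i = 0 := by omega
      simp [h0]

theorem bRuns_eq (cells : List String) :
    bRuns cells = (List.range cells.length).filterMap
      (fun c => if startAt cells cells.length c
        then some (c, natRun (cellsP cells) cells.length c) else none) := by
  unfold bRuns
  rw [bRunsAux_eq cells cells.length cells.length 0 [] (by omega) (Or.inl rfl)]
  unfold runsSpec
  rw [List.range_eq_range']
  simp

-- row / column instantiation
theorem bRow_getD (g : List (List String)) (cols r k : Nat) (hk : k < cols) :
    (bRow g cols r).getD k "" = pvCell g r k := by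
  unfold bRow
  exact getD_map_range _ cols k "" hk

theorem bCol_getD (g : List (List String)) (rows c k : Nat) (hk : k < rows) :
    (bCol g rows c).getD k "" = pvCell g k c := by
  unfold bCol
  exact getD_map_range _ rows k "" hk

theorem natRun_row (g : List (List String)) (cols r : Nat) :
    ∀ c, natRun (cellsP (bRow g cols r)) cols c
      = natRun (fun j => pvCell g r j != ".") cols c := by
  apply natRun_congr
  intro k hk
  simp only [cellsP]
  rw [bRow_getD g cols r k hk]

theorem natRun_col (g : List (List String)) (rows c : Nat) :
    ∀ r, natRun (cellsP (bCol g rows c)) rows r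
      = natRun (fun i => pvCell g i c != ".") rows r := by
  apply natRun_congr
  intro k hk
  simp only [cellsP]
  rw [bCol_getD g rows c k hk]

theorem startAt_row (g : List (List String)) (cols r c : Nat) (hc : c < cols) :
    startAt (bRow g cols r) cols c = startA g cols r c := by
  unfold startAt startA pvCondA
  rw [bRow_getD g cols r c hc, bRow_getD g cols r (c - 1) (by omega), natRun_row]
  by_cases hcell : pvCell g r c = "."
  · simp [hcell]
  · have hc1 : natRun (fun j => pvCell g r j != ".") cols c
        = natRun (fun j => pvCell g r j != ".") cols (c + 1) + 1 := by
      conv_lhs => rw [natRun]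
      rw [dif_pos ⟨hc, by simpa [bne_iff_ne] using hcell⟩]
    by_cases h2 : c + 1 < cols ∧ pvCell g r (c + 1) ≠ "."
    · have h3 : 1 ≤ natRun (fun j => pvCell g r j != ".") cols (c + 1) := by
        conv_rhs => rw [natRun]
        rw [dif_pos ⟨h2.1, by simpa [bne_iff_ne] using h2.2⟩]
        omega
      have h4 : c < cols - 1 := by omega
      have b1 : (pvCell g r c != ".") = true := by simpa [bne_iff_ne] using hcell
      have b2 : (pvCell g r (c + 1) != ".") = true := by simpa [bne_iff_ne] using h2.2
      have h5 : 2 ≤ natRun (fun j => pvCell g r j != ".") cols c := by omega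
      simp [b1, b2, h4, h5]
    · have h0 : natRun (fun j => pvCell g r j != ".") cols (c + 1) = 0 := by
        conv_lhs => rw [natRun]
        rw [dif_neg]
        intro hq
        exact h2 ⟨hq.1, by simpa [bne_iff_ne] using hq.2⟩
      have h6 : ¬ 2 ≤ natRun (fun j => pvCell g r j != ".") cols c := by omega
      rcases Decidable.not_and_iff_not_or_not.mp h2 with h5 | h5
      · have h7 : ¬ (c < cols - 1) := by omega
        simp [h6, h7]
      · have h7 : pvCell g r (c + 1) = "." := by
          by_contra hx; exact h5 hx
        simp [h6, h7]

theorem startAt_col (g : List (List String)) (rows r c : Nat) (hr : r < rows) :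
    startAt (bCol g rows c) rows r = startD g rows r c := by
  unfold startAt startD pvCondD
  rw [bCol_getD g rows c r hr, bCol_getD g rows c (r - 1) (by omega), natRun_col]
  by_cases hcell : pvCell g r c = "."
  · simp [hcell]
  · have hc1 : natRun (fun i => pvCell g i c != ".") rows r
        = natRun (fun i => pvCell g i c != ".") rows (r + 1) + 1 := by
      conv_lhs => rw [natRun]
      rw [dif_pos ⟨hr, by simpa [bne_iff_ne] using hcell⟩]
    by_cases h2 : r + 1 < rows ∧ pvCell g (r + 1) c ≠ "."
    · have h3 : 1 ≤ natRun (fun i => pvCell g i c != ".") rows (r + 1) := by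
        conv_rhs => rw [natRun]
        rw [dif_pos ⟨h2.1, by simpa [bne_iff_ne] using h2.2⟩]
        omega
      have h4 : r < rows - 1 := by omega
      have b1 : (pvCell g r c != ".") = true := by simpa [bne_iff_ne] using hcell
      have b2 : (pvCell g (r + 1) c != ".") = true := by simpa [bne_iff_ne] using h2.2
      have h5 : 2 ≤ natRun (fun i => pvCell g i c != ".") rows r := by omega
      simp [b1, b2, h4, h5]
    · have h0 : natRun (fun i => pvCell g i c != ".") rows (r + 1) = 0 := by
        conv_lhs => rw [natRun]
        rw [dif_neg]
        intro hq
        exact h2 ⟨hq.1, by simpa [bne_iff_ne] using hq.2⟩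
      have h6 : ¬ 2 ≤ natRun (fun i => pvCell g i c != ".") rows r := by omega
      rcases Decidable.not_and_iff_not_or_not.mp h2 with h5 | h5
      · have h7 : ¬ (r < rows - 1) := by omega
        simp [h6, h7]
      · have h7 : pvCell g (r + 1) c = "." := by
          by_contra hx; exact h5 hx
        simp [h6, h7]

def aRunsRow (g : List (List String)) (cols r : Nat) : List (Nat × Nat) :=
  (List.range cols).filterMap (fun c => if startA g cols r c
    then some (c, natRun (fun j => pvCell g r j != ".") cols c) else none)

def dRunsCol (g : List (List String)) (rows c : Nat) : List (Nat × Nat) :=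
  (List.range rows).filterMap (fun r => if startD g rows r c
    then some (r, natRun (fun i => pvCell g i c != ".") rows r) else none)

theorem bRuns_bRow (g : List (List String)) (cols r : Nat) :
    bRuns (bRow g cols r) = aRunsRow g cols r := by
  rw [bRuns_eq]
  have hlen : (bRow g cols r).length = cols := by simp [bRow]
  rw [hlen]
  unfold aRunsRow
  apply List.filterMap_congr
  intro c hc
  have hc' : c < cols := List.mem_range.mp hc
  rw [startAt_row g cols r c hc', natRun_row]

theorem bRuns_bCol (g : List (List String)) (rows c : Nat) :
    bRuns (bCol g rows c) = dRunsCol g rows c := by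
  rw [bRuns_eq]
  have hlen : (bCol g rows c).length = rows := by simp [bCol]
  rw [hlen]
  unfold dRunsCol
  apply List.filterMap_congr
  intro r hr
  have hr' : r < rows := List.mem_range.mp hr
  rw [startAt_col g rows r c hr', natRun_col]

-- the across / down dicts as item lists
def aItems (g : List (List String)) (cols m : Nat) : List ((Nat × Nat) × Int) :=
  (List.range m).flatMap (fun r => (aRunsRow g cols r).map
    (fun p => (((r, p.1) : Nat × Nat), (p.2 : Int))))

def dItems (g : List (List String)) (rows m : Nat) : List ((Nat × Nat) × Int) :=
  (List.range m).flatMap (fun c => (dRunsCol g rows c).map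
    (fun p => (((p.1, c) : Nat × Nat), (p.2 : Int))))

theorem mem_aItems (g : List (List String)) (cols m : Nat) (q : (Nat × Nat) × Int)
    (hq : q ∈ aItems g cols m) :
    q.1.1 < m ∧ q.1.2 < cols ∧ startA g cols q.1.1 q.1.2 = true
      ∧ q.2 = runR g cols q.1.1 q.1.2 := by
  simp only [aItems, aRunsRow, List.mem_flatMap, List.mem_map, List.mem_filterMap,
    List.mem_range] at hq
  obtain ⟨r, hr, p, ⟨c, hc, hcp⟩, hpq⟩ := hq
  by_cases hs : startA g cols r c = true
  · rw [if_pos hs] at hcp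
    cases hcp
    cases hpq
    exact ⟨hr, hc, hs, rfl⟩
  · rw [if_neg hs] at hcp
    cases hcp

theorem mem_dItems (g : List (List String)) (rows m : Nat) (q : (Nat × Nat) × Int)
    (hq : q ∈ dItems g rows m) :
    q.1.2 < m ∧ q.1.1 < rows ∧ startD g rows q.1.1 q.1.2 = true
      ∧ q.2 = runD g rows q.1.2 q.1.1 := by
  simp only [dItems, dRunsCol, List.mem_flatMap, List.mem_map, List.mem_filterMap,
    List.mem_range] at hq
  obtain ⟨c, hc, p, ⟨r, hr, hrp⟩, hpq⟩ := hq
  by_cases hs : startD g rows r c = true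
  · rw [if_pos hs] at hrp
    cases hrp
    cases hpq
    exact ⟨hc, hr, hs, rfl⟩
  · rw [if_neg hs] at hrp
    cases hrp

theorem bAcross_items (g : List (List String)) (rows cols : Nat) :
    (bAcross g rows cols).items = aItems g cols rows := by
  unfold bAcross
  suffices h : ∀ m, ((List.range m).foldl
      (fun d r => (bRuns (bRow g cols r)).foldl
        (fun d p => d.insert (r, p.1) ((p.2 : Int))) d) PySem.Dict.empty).items
      = aItems g cols m from h rows
  intro m
  induction m with
  | zero => simp [aItems, PySem.Dict.empty]
  | succ m ih =>
    rw [List.range_succ, List.foldl_append]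
    simp only [List.foldl_cons, List.foldl_nil]
    rw [bRuns_bRow]
    rw [PySem.Dict.items_foldl_insert_fresh (aRunsRow g cols m)
      (fun p => ((m, p.1) : Nat × Nat)) (fun p => (p.2 : Int)) _ ?fresh ?nd]
    case fresh =>
      intro p hp
      rw [PySem.Dict.contains_eq_decide_mem_keys]
      have hkeys : (((List.range m).foldl
          (fun d r => (bRuns (bRow g cols r)).foldl
            (fun d p => d.insert (r, p.1) ((p.2 : Int))) d) PySem.Dict.empty)).keys
          = (aItems g cols m).map Prod.fst := by
        simp only [PySem.Dict.keys, ih]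
      rw [hkeys]
      simp only [decide_eq_false_iff_not, List.mem_map]
      rintro ⟨q, hq, hq1⟩
      have := (mem_aItems g cols m q hq).1
      rw [hq1] at this
      omega
    case nd =>
      have he : (aRunsRow g cols m).map (fun p => ((m, p.1) : Nat × Nat))
          = (List.range cols).filterMap
            (fun c => if startA g cols m c then some ((m, c) : Nat × Nat) else none) := by
        unfold aRunsRow
        rw [List.map_filterMap]
        apply List.filterMap_congr
        intro c _
        by_cases h : startA g cols m c = true <;> simp [h]
      rw [he]
      apply List.Nodup.filterMap _ (List.nodup_range)
      intro a a' b hb hb'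
      split_ifs at hb hb' <;>
        simp only [Option.mem_def, Option.some_inj, reduceCtorEq] at hb hb'
      exact ((Prod.mk.injEq _ _ _ _).mp (hb.trans hb'.symm)).2
    rw [ih]
    unfold aItems
    rw [List.range_succ, List.flatMap_append]
    simp

theorem bDown_items (g : List (List String)) (rows cols : Nat) :
    (bDown g rows cols).items = dItems g rows cols := by
  unfold bDown
  suffices h : ∀ m, ((List.range m).foldl
      (fun d c => (bRuns (bCol g rows c)).foldl
        (fun d p => d.insert (p.1, c) ((p.2 : Int))) d) PySem.Dict.empty).items
      = dItems g rows m from h cols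
  intro m
  induction m with
  | zero => simp [dItems, PySem.Dict.empty]
  | succ m ih =>
    rw [List.range_succ, List.foldl_append]
    simp only [List.foldl_cons, List.foldl_nil]
    rw [bRuns_bCol]
    rw [PySem.Dict.items_foldl_insert_fresh (dRunsCol g rows m)
      (fun p => ((p.1, m) : Nat × Nat)) (fun p => (p.2 : Int)) _ ?fresh ?nd]
    case fresh =>
      intro p hp
      rw [PySem.Dict.contains_eq_decide_mem_keys]
      have hkeys : (((List.range m).foldl
          (fun d c => (bRuns (bCol g rows c)).foldl
            (fun d p => d.insert (p.1, c) ((p.2 : Int))) d) PySem.Dict.empty)).keys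
          = (dItems g rows m).map Prod.fst := by
        simp only [PySem.Dict.keys, ih]
      rw [hkeys]
      simp only [decide_eq_false_iff_not, List.mem_map]
      rintro ⟨q, hq, hq1⟩
      have := (mem_dItems g rows m q hq).1
      rw [hq1] at this
      omega
    case nd =>
      have he : (dRunsCol g rows m).map (fun p => ((p.1, m) : Nat × Nat))
          = (List.range rows).filterMap
            (fun r => if startD g rows r m then some ((r, m) : Nat × Nat) else none) := by
        unfold dRunsCol
        rw [List.map_filterMap]
        apply List.filterMap_congr
        intro r _
        by_cases h : startD g rows r m = true <;> simp [h]
      rw [he]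
      apply List.Nodup.filterMap _ (List.nodup_range)
      intro a a' b hb hb'
      split_ifs at hb hb' <;>
        simp only [Option.mem_def, Option.some_inj, reduceCtorEq] at hb hb'
      exact ((Prod.mk.injEq _ _ _ _).mp (hb.trans hb'.symm)).1
    rw [ih]
    unfold dItems
    rw [List.range_succ, List.flatMap_append]
    simp

theorem bAcross_nodup (g : List (List String)) (rows cols : Nat) :
    (bAcross g rows cols).keys.Nodup := by
  unfold bAcross
  generalize List.range rows = l
  induction l using List.reverseRecOn with
  | nil => exact PySem.Dict.nodup_keys_empty
  | append_singleton l r ih =>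
    rw [List.foldl_append]
    simp only [List.foldl_cons, List.foldl_nil]
    exact PySem.Dict.nodup_keys_foldl_insert_key _ _ _ _ ih

theorem bDown_nodup (g : List (List String)) (rows cols : Nat) :
    (bDown g rows cols).keys.Nodup := by
  unfold bDown
  generalize List.range cols = l
  induction l using List.reverseRecOn with
  | nil => exact PySem.Dict.nodup_keys_empty
  | append_singleton l c ih =>
    rw [List.foldl_append]
    simp only [List.foldl_cons, List.foldl_nil]
    exact PySem.Dict.nodup_keys_foldl_insert_key _ _ _ _ ih

theorem bAcross_get? (g : List (List String)) (rows cols r c : Nat)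
    (hr : r < rows) (hc : c < cols) :
    (bAcross g rows cols).get? (r, c)
      = if startA g cols r c then some (runR g cols r c) else none := by
  by_cases hs : startA g cols r c = true
  · rw [if_pos hs]
    apply PySem.Dict.get?_of_mem_items _ _ (bAcross_nodup g rows cols)
    rw [bAcross_items]
    simp only [aItems, aRunsRow, List.mem_flatMap, List.mem_map, List.mem_filterMap,
      List.mem_range]
    exact ⟨r, hr, (c, natRun (fun j => pvCell g r j != ".") cols c),
      ⟨c, hc, by rw [if_pos hs]⟩, rfl⟩
  · rw [if_neg hs, PySem.Dict.get?_eq_none_iff_not_mem_keys]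
    intro hmem
    have hkeys : (bAcross g rows cols).keys = (aItems g cols rows).map Prod.fst := by
      simp only [PySem.Dict.keys, bAcross_items]
    rw [hkeys] at hmem
    obtain ⟨q, hq, hq1⟩ := List.mem_map.mp hmem
    obtain ⟨-, -, hsa, -⟩ := mem_aItems g cols rows q hq
    rw [hq1] at hsa
    exact hs hsa

theorem bDown_get? (g : List (List String)) (rows cols r c : Nat)
    (hr : r < rows) (hc : c < cols) :
    (bDown g rows cols).get? (r, c)
      = if startD g rows r c then some (runD g rows c r) else none := by
  by_cases hs : startD g rows r c = true
  · rw [if_pos hs]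
    apply PySem.Dict.get?_of_mem_items _ _ (bDown_nodup g rows cols)
    rw [bDown_items]
    simp only [dItems, dRunsCol, List.mem_flatMap, List.mem_map, List.mem_filterMap,
      List.mem_range]
    exact ⟨c, hc, (r, natRun (fun i => pvCell g i c != ".") rows r),
      ⟨r, hr, by rw [if_pos hs]⟩, rfl⟩
  · rw [if_neg hs, PySem.Dict.get?_eq_none_iff_not_mem_keys]
    intro hmem
    have hkeys : (bDown g rows cols).keys = (dItems g rows cols).map Prod.fst := by
      simp only [PySem.Dict.keys, bDown_items]
    rw [hkeys] at hmem
    obtain ⟨q, hq, hq1⟩ := List.mem_map.mp hmem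
    obtain ⟨-, -, hsd, -⟩ := mem_dItems g rows cols q hq
    rw [hq1] at hsd
    exact hs hsd

theorem bAcross_contains (g : List (List String)) (rows cols r c : Nat)
    (hr : r < rows) (hc : c < cols) :
    (bAcross g rows cols).contains (r, c) = startA g cols r c := by
  rw [PySem.Dict.contains_eq_isSome_get?, bAcross_get? g rows cols r c hr hc]
  by_cases hs : startA g cols r c = true <;> simp [hs]

theorem bDown_contains (g : List (List String)) (rows cols r c : Nat)
    (hr : r < rows) (hc : c < cols) :
    (bDown g rows cols).contains (r, c) = startD g rows r c := by
  rw [PySem.Dict.contains_eq_isSome_get?, bDown_get? g rows cols r c hr hc]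
  by_cases hs : startD g rows r c = true <;> simp [hs]

-- the numbering dict as an item list
def rowN (g : List (List String)) (rows cols r k : Nat) : List ((Nat × Nat) × Int) :=
  (List.range k).filterMap (fun c => if stB g rows cols r c
    then some (((r, c) : Nat × Nat), numAt g rows cols r c) else none)

def nItems (g : List (List String)) (rows cols m : Nat) : List ((Nat × Nat) × Int) :=
  (List.range m).flatMap (fun r => rowN g rows cols r cols)

theorem rowN_length (g : List (List String)) (rows cols r : Nat) :
    ∀ k, (rowN g rows cols r k).length = cntRow g rows cols r k := by
  intro k
  induction k with
  | zero => simp [rowN, cntRow]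
  | succ k ih =>
    unfold rowN
    rw [List.range_succ, List.filterMap_append, List.length_append, cntRow_succ]
    unfold rowN at ih
    rw [ih]
    by_cases h : stB g rows cols r k = true <;> simp [h]

theorem nItems_length (g : List (List String)) (rows cols : Nat) :
    ∀ m, (nItems g rows cols m).length = cntUpTo g rows cols m := by
  intro m
  induction m with
  | zero => simp [nItems, cntUpTo]
  | succ m ih =>
    unfold nItems
    rw [List.range_succ, List.flatMap_append, List.length_append, cntUpTo_succ]
    unfold nItems at ih
    simp [ih, rowN_length]

theorem mem_rowN (g : List (List String)) (rows cols r k : Nat) (q : (Nat × Nat) × Int)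
    (hq : q ∈ rowN g rows cols r k) :
    q.1.1 = r ∧ q.1.2 < k ∧ stB g rows cols r q.1.2 = true
      ∧ q.2 = numAt g rows cols r q.1.2 := by
  simp only [rowN, List.mem_filterMap, List.mem_range] at hq
  obtain ⟨c, hc, hcq⟩ := hq
  by_cases hs : stB g rows cols r c = true
  · rw [if_pos hs] at hcq
    cases hcq
    exact ⟨rfl, hc, hs, rfl⟩
  · rw [if_neg hs] at hcq
    cases hcq

theorem mem_nItems (g : List (List String)) (rows cols m : Nat) (q : (Nat × Nat) × Int)
    (hq : q ∈ nItems g rows cols m) :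
    q.1.1 < m ∧ q.1.2 < cols ∧ stB g rows cols q.1.1 q.1.2 = true
      ∧ q.2 = numAt g rows cols q.1.1 q.1.2 := by
  simp only [nItems, List.mem_flatMap, List.mem_range] at hq
  obtain ⟨r, hr, hrq⟩ := hq
  obtain ⟨h1, h2, h3, h4⟩ := mem_rowN g rows cols r cols q hrq
  subst h1
  exact ⟨hr, h2, h3, h4⟩

theorem numInner (g : List (List String)) (rows cols r : Nat) (hr : r < rows)
    (d : PySem.Dict (Nat × Nat) Int) (hd : d.items = nItems g rows cols r) :
    ∀ k, k ≤ cols →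
    ((List.range k).foldl
      (fun d c => if (bAcross g rows cols).contains (r, c) || (bDown g rows cols).contains (r, c)
        then d.insert (r, c) ((d.size : Int) + 1) else d) d).items
      = nItems g rows cols r ++ rowN g rows cols r k := by
  intro k
  induction k with
  | zero => simpa [rowN] using hd
  | succ k ih =>
    intro hk1
    have hk : k < cols := by omega
    rw [List.range_succ, List.foldl_append]
    simp only [List.foldl_cons, List.foldl_nil]
    have hcc : ((bAcross g rows cols).contains (r, k) || (bDown g rows cols).contains (r, k))
        = stB g rows cols r k := by
      rw [bAcross_contains g rows cols r k hr hk, bDown_contains g rows cols r k hr hk]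
      rfl
    have hrowN : rowN g rows cols r (k + 1) = rowN g rows cols r k
        ++ (if stB g rows cols r k = true
            then [(((r, k) : Nat × Nat), numAt g rows cols r k)] else []) := by
      unfold rowN
      rw [List.range_succ, List.filterMap_append]
      congr 1
      by_cases h : stB g rows cols r k = true <;> simp [h]
    by_cases hs : stB g rows cols r k = true
    · rw [hcc, if_pos hs]
      set dk := (List.range k).foldl
        (fun d c => if (bAcross g rows cols).contains (r, c) || (bDown g rows cols).contains (r, c)
          then d.insert (r, c) ((d.size : Int) + 1) else d) d with hdk
      have hitems : dk.items = nItems g rows cols r ++ rowN g rows cols r k := ih (by omega)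
      have hnc : dk.contains (r, k) = false := by
        rw [PySem.Dict.contains_eq_decide_mem_keys]
        have hkeys : dk.keys = (nItems g rows cols r ++ rowN g rows cols r k).map Prod.fst := by
          simp only [PySem.Dict.keys, hitems]
        rw [hkeys]
        simp only [decide_eq_false_iff_not, List.mem_map]
        rintro ⟨q, hq, hq1⟩
        rcases List.mem_append.mp hq with h | h
        · have := (mem_nItems g rows cols r q h).1
          rw [hq1] at this
          omega
        · have h2 := (mem_rowN g rows cols r k q h).2.1
          rw [hq1] at h2
          omega
      rw [PySem.Dict.items_insert_of_not_contains dk _ hnc, hitems]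
      have hsize : dk.size = cntUpTo g rows cols r + cntRow g rows cols r k := by
        simp only [PySem.Dict.size, hitems, List.length_append, nItems_length, rowN_length]
      have hval : ((dk.size : Int) + 1) = numAt g rows cols r k := by
        rw [hsize]
        unfold numAt
        push_cast
        ring
      rw [hval, hrowN, if_pos hs, List.append_assoc]
    · rw [hcc, if_neg (by simp [hs]), hrowN, if_neg hs]
      rw [List.append_nil]
      exact ih (by omega)

theorem bNumber_items (g : List (List String)) (rows cols : Nat) :
    (bNumber (bAcross g rows cols) (bDown g rows cols) rows cols).items
      = nItems g rows cols rows := by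
  unfold bNumber
  suffices h : ∀ m, m ≤ rows → ((List.range m).foldl
      (fun d r => (List.range cols).foldl
        (fun d c => if (bAcross g rows cols).contains (r, c) || (bDown g rows cols).contains (r, c)
          then d.insert (r, c) ((d.size : Int) + 1) else d) d) PySem.Dict.empty).items
      = nItems g rows cols m from h rows (Nat.le_refl _)
  intro m
  induction m with
  | zero =>
    intro _
    simp [nItems, PySem.Dict.empty]
  | succ m ih =>
    intro hm
    rw [List.range_succ, List.foldl_append]
    simp only [List.foldl_cons, List.foldl_nil]
    rw [numInner g rows cols m (by omega) _ (ih (by omega)) cols (Nat.le_refl _)]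
    unfold nItems
    rw [List.range_succ, List.flatMap_append]
    simp

theorem bNumber_nodup (g : List (List String)) (rows cols : Nat) :
    (bNumber (bAcross g rows cols) (bDown g rows cols) rows cols).keys.Nodup := by
  unfold bNumber
  generalize List.range rows = l
  have hinner : ∀ (r : Nat) (l2 : List Nat) (d : PySem.Dict (Nat × Nat) Int), d.keys.Nodup →
      (l2.foldl (fun d c => if (bAcross g rows cols).contains (r, c)
          || (bDown g rows cols).contains (r, c)
        then d.insert (r, c) ((d.size : Int) + 1) else d) d).keys.Nodup := by
    intro r l2
    induction l2 with
    | nil => intro d h; exact h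
    | cons c l2 ih =>
      intro d h
      simp only [List.foldl_cons]
      by_cases hc : ((bAcross g rows cols).contains (r, c)
          || (bDown g rows cols).contains (r, c)) = true
      · rw [if_pos hc]
        exact ih _ (PySem.Dict.nodup_keys_insert d _ _ h)
      · rw [if_neg hc]
        exact ih _ h
  induction l using List.reverseRecOn with
  | nil => exact PySem.Dict.nodup_keys_empty
  | append_singleton l r ih =>
    rw [List.foldl_append]
    simp only [List.foldl_cons, List.foldl_nil]
    exact hinner r _ _ ih

theorem bNumber_get? (g : List (List String)) (rows cols r c : Nat)
    (hr : r < rows) (hc : c < cols) :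
    (bNumber (bAcross g rows cols) (bDown g rows cols) rows cols).get? (r, c)
      = if stB g rows cols r c then some (numAt g rows cols r c) else none := by
  by_cases hs : stB g rows cols r c = true
  · rw [if_pos hs]
    apply PySem.Dict.get?_of_mem_items _ _ (bNumber_nodup g rows cols)
    rw [bNumber_items]
    simp only [nItems, rowN, List.mem_flatMap, List.mem_filterMap, List.mem_range]
    exact ⟨r, hr, c, hc, by rw [if_pos hs]⟩
  · rw [if_neg hs, PySem.Dict.get?_eq_none_iff_not_mem_keys]
    intro hmem
    have hkeys : (bNumber (bAcross g rows cols) (bDown g rows cols) rows cols).keys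
        = (nItems g rows cols rows).map Prod.fst := by
      simp only [PySem.Dict.keys, bNumber_items]
    rw [hkeys] at hmem
    obtain ⟨q, hq, hq1⟩ := List.mem_map.mp hmem
    obtain ⟨-, -, hsb, -⟩ := mem_nItems g rows cols rows q hq
    rw [hq1] at hsb
    exact hs hsb

-- slot lists of B from the numbering items
theorem bSlots_across (g : List (List String)) (rows cols : Nat) :
    (nItems g rows cols rows).filterMap
        (fun p => match (bAcross g rows cols).get? p.1 with
          | some L => some (p.2, (p.1.1 : Int), (p.1.2 : Int), L)
          | none => none)
      = cfAP g rows cols rows := by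
  unfold nItems cfAP
  rw [List.filterMap_flatMap]
  apply List.flatMap_congr
  intro r hrm
  have hr : r < rows := List.mem_range.mp hrm
  unfold rowN cfARowP
  rw [List.filterMap_filterMap]
  apply List.filterMap_congr
  intro c hcm
  have hc : c < cols := List.mem_range.mp hcm
  by_cases hs : stB g rows cols r c = true
  · rw [if_pos hs]
    simp only [Option.bind_some]
    rw [bAcross_get? g rows cols r c hr hc]
    by_cases ha : startA g cols r c = true
    · rw [if_pos ha, if_pos ha]
    · rw [if_neg ha, if_neg ha]
  · have ha : startA g cols r c = false := by
      cases h : startA g cols r c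
      · rfl
      · exact absurd (by simp [stB, h]) hs
    rw [if_neg hs, if_neg (by simp [ha])]
    rfl

theorem bSlots_down (g : List (List String)) (rows cols : Nat) :
    (nItems g rows cols rows).filterMap
        (fun p => match (bDown g rows cols).get? p.1 with
          | some L => some (p.2, (p.1.1 : Int), (p.1.2 : Int), L)
          | none => none)
      = cfDP g rows cols rows := by
  unfold nItems cfDP
  rw [List.filterMap_flatMap]
  apply List.flatMap_congr
  intro r hrm
  have hr : r < rows := List.mem_range.mp hrm
  unfold rowN cfDRowP
  rw [List.filterMap_filterMap]
  apply List.filterMap_congr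
  intro c hcm
  have hc : c < cols := List.mem_range.mp hcm
  by_cases hs : stB g rows cols r c = true
  · rw [if_pos hs]
    simp only [Option.bind_some]
    rw [bDown_get? g rows cols r c hr hc]
    by_cases ha : startD g rows r c = true
    · rw [if_pos ha, if_pos ha]
    · rw [if_neg ha, if_neg ha]
  · have ha : startD g rows r c = false := by
      cases h : startD g rows r c
      · rfl
      · exact absurd (by simp [stB, h]) hs
    rw [if_neg hs, if_neg (by simp [ha])]
    rfl

-- ===== VERDICT (by name: the statement is the Claim_ definition above) =====
theorem compute_numbering_spec : Claim_equal_compute_numbering := by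
  intro grid _ _
  unfold Spec_compute_numbering
  by_cases h : grid = [] ∨ grid.headD [] = []
  · simp only [compute_numbering, compute_numbering_alt, if_pos h]
  · simp only [compute_numbering, compute_numbering_alt, if_neg h]
    rw [pass1fold grid grid.length (grid.headD []).length grid.length (Nat.le_refl _)]
    simp only []
    rw [gPart_full]
    rw [pass2fold grid grid.length (grid.headD []).length grid.length (Nat.le_refl _)]
    rw [bNumber_items, bSlots_across, bSlots_down]
    apply Prod.ext
    · apply map_range_congr
      intro r hr
      unfold cfRow
      apply map_range_congr
      intro c hc
      rw [bNumber_get? grid grid.length (grid.headD []).length r c hr hc]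
    · rfl
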